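-- pv_equiv track=rewrite | github.com/milesokamoto/pbpy | modules/game.py | all_plays
-- ===== SOURCE A (Python) =====
-- def all_plays(play_list, team):
--     # Maybe create a new module of helper functions
--     """helper function to list all plays for one side
--
--     :param play_list: list of play by play strings
--     :type play_list: list
--     :param team: 'h' for home or 'a' for away or other for all plays in the game
--     :type team: str
--     :return: list of play strings
--     :rtype: list
--     """
--     out = []
--     for i in range(0, len(play_list)):
--             x = play_list[i]
--             for p in x:
--                 if (team == 0) ^ (i % 2 == 1) or not team in [0, 1]:
--                     out.append(p)
--     return out
-- ===== SOURCE B (Python) =====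
-- def all_plays(play_list, team):
--     if team not in (0, 1):
--         return [p for x in play_list for p in x]
--     out = []
--     rest = play_list[1:] if team == 1 else play_list
--     while rest:
--         out.extend(rest[0])
--         rest = rest[2:]
--     return out
-- ===== Notes on version B (the rewrite author's own statement) =====
-- stated objective: simpler
-- what changed: Replaced the per-element XOR membership test inside A's nested index loops by a single branch on team that selects the whole list or the even/odd-position sublist (a skip-one loop) and then flattens it with list.extend.
import Mathlib
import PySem

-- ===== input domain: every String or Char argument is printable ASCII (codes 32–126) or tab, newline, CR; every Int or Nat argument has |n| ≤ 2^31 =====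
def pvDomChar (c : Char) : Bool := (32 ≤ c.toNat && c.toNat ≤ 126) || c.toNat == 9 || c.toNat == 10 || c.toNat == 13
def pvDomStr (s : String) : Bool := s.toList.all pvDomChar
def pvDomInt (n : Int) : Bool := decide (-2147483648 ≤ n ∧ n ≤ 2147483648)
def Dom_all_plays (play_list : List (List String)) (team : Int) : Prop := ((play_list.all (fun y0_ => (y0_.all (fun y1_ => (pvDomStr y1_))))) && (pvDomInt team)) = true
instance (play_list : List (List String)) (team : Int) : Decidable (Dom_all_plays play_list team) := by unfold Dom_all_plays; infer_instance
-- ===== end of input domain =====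

-- B replaces the per-element XOR test inside A's nested index loops by one branch on team
-- (all / even positions / odd positions) followed by a single flatten pass (objective: simpler).

-- ===== PORT A =====
def all_plays (play_list : List (List String)) (team : Int) : List String :=
  (PySem.List.pyRange 0 (play_list.length : Int) 1).foldl
    (fun out i =>
      let x := (PySem.List.pyGet? play_list i).getD []   -- i ∈ range(len) so pyGet? is always some
      x.foldl
        (fun out p =>
          if ((team == 0) != (PySem.Int.mod i 2 == 1)) || !(team == 0 || team == 1)
          then out ++ [p] else out)
        out)
    []

-- ===== PORT B =====
-- the while loop of Source B: out.extend(rest[0]); rest = rest[2:]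
def allPlaysAltLoop (out : List String) : List (List String) → List String
  | [] => out
  | x :: rest => allPlaysAltLoop (out ++ x) (rest.drop 1)   -- (x::rest)[2:] = rest.drop 1
  termination_by r => r.length
  decreasing_by simp

def all_plays_alt (play_list : List (List String)) (team : Int) : List String :=
  if !(team == 0 || team == 1) then
    play_list.flatMap (fun x => x)    -- [p for x in play_list for p in x]
  else
    allPlaysAltLoop [] (if team == 1 then play_list.drop 1 else play_list)  -- play_list[1:]

-- ===== PRECONDITION & SPEC =====
def Spec_all_plays (play_list : List (List String)) (team : Int) (out : List String) : Prop := out = all_plays_alt play_list team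
instance (play_list : List (List String)) (team : Int) (out : List String) : Decidable (Spec_all_plays play_list team out) := by unfold Spec_all_plays; infer_instance

-- ===== CLAIM (what is proved, stated in full; the proofs are below) =====
def Claim_equal_all_plays : Prop := ∀ (play_list : List (List String)) (team : Int), Dom_all_plays play_list team → Spec_all_plays play_list team (all_plays play_list team)

-- ===== LEMMAS AND PROOFS =====

-- A's selection condition, over the Nat loop index
def condN (team : Int) (k : Nat) : Bool :=
  ((team == 0) != (k % 2 == 1)) || !(team == 0 || team == 1)

-- index-selected flatten, recursively shifting the condition
def goB (c : Nat → Bool) : List (List String) → List String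
  | [] => []
  | x :: t => (if c 0 then x else []) ++ goB (fun k => c (k + 1)) t

-- every-other-element flatten (what Source B's while loop computes)
def flat2 : List (List String) → List String
  | [] => []
  | x :: rest => x ++ flat2 (rest.drop 1)
  termination_by r => r.length
  decreasing_by simp

def ce (k : Nat) : Bool := !(k % 2 == 1)
def co (k : Nat) : Bool := (k % 2 == 1)

lemma cast_mod_beq (m : Nat) : (((m : Int) == (1 : Int)) : Bool) = (m == 1) := by
  rcases eq_or_ne m 1 with h | h <;> simp [h]

-- A's nested loop with a loop-invariant inner condition, as one flatMap
lemma foldl_inner_if (C : Int → Bool) (g : Int → List String) :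
    ∀ (l : List Int) (out : List String),
      l.foldl (fun out i => (g i).foldl (fun out p => if C i then out ++ [p] else out) out) out
        = out ++ l.flatMap (fun i => if C i then g i else []) := by
  intro l
  induction l with
  | nil => intro out; simp
  | cons i t ih =>
    intro out
    have hinner : (g i).foldl (fun out p => if C i then out ++ [p] else out) out
        = out ++ (if C i then g i else []) := by
      by_cases h : C i = true
      · have hfn : (fun (out : List String) p => if C i = true then out ++ [p] else out)
            = (fun (out : List String) p => out ++ [p]) := by
          funext o p; rw [if_pos h]
        rw [hfn, if_pos h]
        exact PySem.List.foldl_append_singleton_eq_self _ _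
      · simp only [Bool.not_eq_true] at h
        simp [h]
    simp only [List.foldl_cons, List.flatMap_cons, hinner, ih, List.append_assoc]

lemma A_eq_flat (pl : List (List String)) (team : Int) :
    all_plays pl team =
      (List.range pl.length).flatMap (fun k => if condN team k then pl.getD k [] else []) := by
  show (PySem.List.pyRange 0 (pl.length : Int) 1).foldl
      (fun out i =>
        ((PySem.List.pyGet? pl i).getD []).foldl
          (fun out p =>
            if ((team == 0) != (PySem.Int.mod i 2 == 1)) || !(team == 0 || team == 1)
            then out ++ [p] else out)
          out)
      [] = _
  rw [foldl_inner_if (fun i => ((team == 0) != (PySem.Int.mod i 2 == 1)) || !(team == 0 || team == 1))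
        (fun i => (PySem.List.pyGet? pl i).getD [])]
  rw [PySem.List.pyRange_zero_nat, List.flatMap_map, List.nil_append]
  apply List.flatMap_congr
  intro k _
  have hget : (PySem.List.pyGet? pl (k : Int)).getD [] = pl.getD k [] := by
    rw [PySem.List.pyGet?_of_nonneg pl (Int.natCast_nonneg k)]
    simp [List.getD]
  have hmod : PySem.Int.mod (k : Int) 2 = ((k % 2 : Nat) : Int) := by
    exact_mod_cast PySem.Int.mod_natCast k 2
  simp only [hmod, cast_mod_beq, hget, condN]
  rfl

lemma goB_congr (c c' : Nat → Bool) (h : ∀ k, c k = c' k) :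
    ∀ pl, goB c pl = goB c' pl := by
  intro pl
  induction pl generalizing c c' with
  | nil => rfl
  | cons x t ih => simp [goB, h 0, ih (fun k => c (k + 1)) (fun k => c' (k + 1)) (fun k => h (k + 1))]

lemma flat_goB (pl : List (List String)) :
    ∀ c : Nat → Bool,
      (List.range pl.length).flatMap (fun k => if c k then pl.getD k [] else []) = goB c pl := by
  induction pl with
  | nil => intro c; simp [goB]
  | cons x t ih =>
    intro c
    rw [List.length_cons, List.range_succ_eq_map]
    simp only [List.flatMap_cons, List.flatMap_map, List.getD_cons_zero,
      List.getD_cons_succ, goB]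
    rw [ih (fun k => c (k + 1))]

lemma goB_true (pl : List (List String)) :
    ∀ c : Nat → Bool, (∀ k, c k = true) → goB c pl = pl.flatMap (fun x => x) := by
  induction pl with
  | nil => intro c _; rfl
  | cons x t ih =>
    intro c h
    simp [goB, h 0, ih (fun k => c (k + 1)) (fun k => h (k + 1))]

lemma shift_ce (k : Nat) : ce (k + 1) = co k := by
  unfold ce co
  rcases Nat.mod_two_eq_zero_or_one k with h | h
  · have h1 : (k + 1) % 2 = 1 := by omega
    simp [h, h1]
  · have h1 : (k + 1) % 2 = 0 := by omega
    simp [h, h1]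

lemma shift_co (k : Nat) : co (k + 1) = ce k := by
  unfold ce co
  rcases Nat.mod_two_eq_zero_or_one k with h | h
  · have h1 : (k + 1) % 2 = 1 := by omega
    simp [h, h1]
  · have h1 : (k + 1) % 2 = 0 := by omega
    simp [h, h1]

lemma goB_par (pl : List (List String)) :
    goB ce pl = flat2 pl ∧ goB co pl = flat2 (pl.drop 1) := by
  induction pl with
  | nil => exact ⟨by rw [flat2.eq_1]; rfl, by show goB co [] = flat2 []; rw [flat2.eq_1]; rfl⟩
  | cons x t ih =>
    constructor
    · show (if ce 0 then x else []) ++ goB (fun k => ce (k + 1)) t = flat2 (x :: t)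
      rw [goB_congr _ co shift_ce, ih.2, flat2.eq_2]
      simp [ce, List.drop_one]
    · show (if co 0 then x else []) ++ goB (fun k => co (k + 1)) t = flat2 ((x :: t).drop 1)
      rw [goB_congr _ ce shift_co, ih.1]
      simp [co]

lemma loop_eq : ∀ (pl : List (List String)) (out : List String),
    allPlaysAltLoop out pl = out ++ flat2 pl := by
  intro pl
  induction hn : pl.length using Nat.strong_induction_on generalizing pl with
  | _ n ih =>
    cases pl with
    | nil => intro out; rw [allPlaysAltLoop.eq_1, flat2.eq_1]; simp
    | cons x rest =>
      intro out
      have hlt : (rest.drop 1).length < n := by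
        simp only [List.length_cons] at hn
        simp only [List.length_drop]
        omega
      rw [allPlaysAltLoop.eq_2, flat2.eq_2, ih _ hlt _ rfl, List.append_assoc]

-- ===== VERDICT (by name: the statement is the Claim_ definition above) =====
theorem all_plays_spec : Claim_equal_all_plays := by
  intro pl team _
  unfold Spec_all_plays
  rw [A_eq_flat]
  by_cases t0 : team = 0
  · subst t0
    have hc : ∀ k, condN 0 k = ce k := by intro k; simp [condN, ce]
    rw [flat_goB, goB_congr _ ce hc, (goB_par pl).1]
    simp [all_plays_alt, loop_eq]
  · by_cases t1 : team = 1
    · subst t1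
      have hc : ∀ k, condN 1 k = co k := by intro k; simp [condN, co]
      rw [flat_goB, goB_congr _ co hc, (goB_par pl).2]
      simp [all_plays_alt, loop_eq]
    · have hc : ∀ k, condN team k = true := by intro k; simp [condN, t0, t1]
      rw [flat_goB, goB_true pl _ hc]
      simp [all_plays_alt, t0, t1]
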